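-- pv_equiv track=rewrite | github.com/gsmin02/Algorithm | 프로그래머스/0/120850. 문자열 정렬하기 （1）/문자열 정렬하기 （1）.py | solution
-- ===== SOURCE A (Python) =====
-- def solution(my_string):
--     num = ["0","1","2","3","4","5","6","7","8","9"]
--     arr = []
--     for str in my_string:
--         if str in num:
--             arr.append(int(str))
--     answer = sorted(arr)
--     return answer
-- ===== SOURCE B (Python) =====
-- def solution(my_string):
--     counts = [0] * 10
--     for ch in my_string:
--         if ch.isdigit():
--             counts[int(ch)] += 1
--     answer = []
--     for d in range(10):
--         answer += [d] * counts[d]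
--     return answer
-- ===== Notes on version B (the rewrite author's own statement) =====
-- stated objective: faster
-- what changed: Replaced collect-digits-then-comparison-sort with a single-pass counting sort: one scan increments a 10-slot count array, then the answer is emitted as d repeated counts[d] times for d = 0..9.
import Mathlib
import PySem

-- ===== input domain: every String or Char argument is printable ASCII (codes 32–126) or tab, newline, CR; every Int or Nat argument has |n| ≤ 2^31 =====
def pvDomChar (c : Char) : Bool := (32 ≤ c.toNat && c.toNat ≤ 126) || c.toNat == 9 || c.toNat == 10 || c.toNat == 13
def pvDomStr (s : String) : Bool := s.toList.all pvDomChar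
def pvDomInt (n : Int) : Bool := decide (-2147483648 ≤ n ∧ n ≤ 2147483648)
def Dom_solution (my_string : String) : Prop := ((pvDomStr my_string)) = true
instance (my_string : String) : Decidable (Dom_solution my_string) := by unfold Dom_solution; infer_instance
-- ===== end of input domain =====

-- B replaces "collect digits then comparison-sort" by a single-pass counting sort over a
-- 10-slot count array (faster, measured).

-- ===== PORT A =====
def solution (my_string : String) : List Int :=
  let num : List String := ["0","1","2","3","4","5","6","7","8","9"]
  let arr : List Int := my_string.toList.foldl (fun arr c =>
    if String.ofList [c] ∈ num then
      -- int(str); a digit character always parses, the none branch is unreachable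
      match PySem.Int.ofChars? [c] with
      | some v => arr ++ [v]
      | none => arr
    else arr) []
  PySem.List.sorted arr (fun x => x) false

-- ===== PORT B =====
def solution_alt (my_string : String) : List Int :=
  let counts0 : List Int := List.replicate 10 0
  let counts : List Int := my_string.toList.foldl (fun cs c =>
    if PySem.Chars.isdigit c then
      -- counts[int(ch)] += 1; a digit character always parses, the none branch is unreachable
      match PySem.Int.ofChars? [c] with
      | some v => cs.set v.toNat (PySem.List.pyGetD cs v 0 + 1)
      | none => cs
    else cs) counts0
  (PySem.List.pyRange 0 10 1).foldl (fun ans d =>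
    ans ++ List.replicate (PySem.List.pyGetD counts d 0).toNat d) []

-- ===== PRECONDITION & SPEC =====
def Spec_solution (my_string : String) (out : List Int) : Prop := out = solution_alt my_string
instance (my_string : String) (out : List Int) : Decidable (Spec_solution my_string out) := by unfold Spec_solution; infer_instance

-- ===== CLAIM (what is proved, stated in full; the proofs are below) =====
def Claim_equal_solution : Prop := ∀ (my_string : String), Dom_solution my_string → Spec_solution my_string (solution my_string)

-- ===== LEMMAS AND PROOFS =====

/-- the integer value of a digit character -/
def dval (c : Char) : Int := (c.toNat : Int) - 48

/-- the digit values of a character list, in order -/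
def digs (cs : List Char) : List Int := (cs.filter PySem.Chars.isdigit).map dval

theorem digit_cases (c : Char) (h : PySem.Chars.isdigit c = true) :
    c ∈ ['0','1','2','3','4','5','6','7','8','9'] := by
  simp [PySem.Chars.isdigit, Char.le_def] at h
  obtain ⟨h1, h2⟩ := h
  have l : 48 ≤ c.toNat := h1
  have r : c.toNat ≤ 57 := h2
  have hc : Char.ofNat c.toNat = c := Char.ofNat_toNat c
  interval_cases h : c.toNat <;> rw [← hc] <;> decide

theorem ofChars_digit (c : Char) (h : PySem.Chars.isdigit c = true) :
    PySem.Int.ofChars? [c] = some (dval c) := by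
  have := digit_cases c h
  fin_cases this <;> decide

theorem dval_bounds (c : Char) (h : PySem.Chars.isdigit c = true) :
    0 ≤ dval c ∧ dval c < 10 := by
  have := digit_cases c h
  fin_cases this <;> decide

theorem mem_num_iff (c : Char) :
    (String.ofList [c] ∈ (["0","1","2","3","4","5","6","7","8","9"] : List String)) ↔
      PySem.Chars.isdigit c = true := by
  constructor
  · intro h
    simp only [List.mem_cons, List.not_mem_nil, or_false] at h
    rcases h with h|h|h|h|h|h|h|h|h|h <;>
      (have := congrArg String.toList h; simp at this; exact this ▸ (by decide))
  · intro h
    have := digit_cases c h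
    fin_cases this <;> decide

theorem a_eq (s : String) :
    solution s = PySem.List.sorted (digs s.toList) (fun x => x) false := by
  unfold solution
  have hstep : (fun (arr : List Int) (c : Char) =>
      if String.ofList [c] ∈ (["0","1","2","3","4","5","6","7","8","9"] : List String) then
        match PySem.Int.ofChars? [c] with
        | some v => arr ++ [v]
        | none => arr
      else arr)
      = fun arr c => if PySem.Chars.isdigit c then arr ++ [dval c] else arr := by
    funext arr c
    by_cases hd : PySem.Chars.isdigit c = true
    · rw [if_pos ((mem_num_iff c).2 hd), if_pos hd, ofChars_digit c hd]
    · rw [if_neg (fun hm => hd ((mem_num_iff c).1 hm)), if_neg hd]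
  simp only [hstep, PySem.List.foldl_append_if]
  rfl

/-- B's fold step -/
def bstep (cs : List Int) (c : Char) : List Int :=
  if PySem.Chars.isdigit c then
    match PySem.Int.ofChars? [c] with
    | some v => cs.set v.toNat (PySem.List.pyGetD cs v 0 + 1)
    | none => cs
  else cs

theorem counts_inv (cs : List Char) : ∀ (c0 : List Int), c0.length = 10 →
    (cs.foldl bstep c0).length = 10 ∧
    ∀ d : Int, 0 ≤ d → d < 10 →
      PySem.List.pyGetD (cs.foldl bstep c0) d 0
        = PySem.List.pyGetD c0 d 0 + ((digs cs).count d : Int) := by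
  induction cs with
  | nil => intro c0 h0; exact ⟨h0, fun d _ _ => by simp [digs]⟩
  | cons c cs ih =>
    intro c0 h0
    by_cases hd : PySem.Chars.isdigit c = true
    · have hb : bstep c0 c = c0.set (dval c).toNat (PySem.List.pyGetD c0 (dval c) 0 + 1) := by
        simp [bstep, hd, ofChars_digit c hd]
      have hlen : (bstep c0 c).length = 10 := by rw [hb]; simpa using h0
      obtain ⟨hl, hv⟩ := ih (bstep c0 c) hlen
      refine ⟨by simpa using hl, fun d hd0 hd10 => ?_⟩
      rw [List.foldl_cons, hv d hd0 hd10]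
      obtain ⟨hb0, hb10⟩ := dval_bounds c hd
      have hget : PySem.List.pyGetD (bstep c0 c) d 0
          = PySem.List.pyGetD c0 d 0 + (if dval c = d then 1 else 0) := by
        rw [hb, PySem.List.pyGetD_of_nonneg _ _ hd0, PySem.List.pyGetD_of_nonneg _ _ hd0,
            PySem.List.pyGetD_of_nonneg _ _ hb0]
        by_cases he : dval c = d
        · subst he
          rw [if_pos rfl, List.getD_eq_getElem?_getD, List.getElem?_set_self', List.getD_eq_getElem?_getD]
          have : (dval c).toNat < c0.length := by omega
          simp [List.getElem?_eq_getElem this]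
        · have hne : (dval c).toNat ≠ d.toNat := by omega
          rw [if_neg he, List.getD_eq_getElem?_getD, List.getElem?_set_ne hne,
              List.getD_eq_getElem?_getD]
          ring
      rw [hget]
      have hdigs : digs (c :: cs) = dval c :: digs cs := by simp [digs, hd]
      rw [hdigs, List.count_cons]
      by_cases he : dval c = d <;> · simp [he]; try omega
    · have hb : bstep c0 c = c0 := by simp [bstep, hd]
      have hdigs : digs (c :: cs) = digs cs := by simp [digs, hd]
      obtain ⟨hl, hv⟩ := ih (bstep c0 c) (by rw [hb]; exact h0)
      exact ⟨by simpa using hl, fun d h1 h2 => by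
        rw [List.foldl_cons, hv d h1 h2, hb, hdigs]⟩

theorem b_eq (s : String) :
    solution_alt s
      = (PySem.List.pyRange 0 10 1).flatMap
          (fun d => List.replicate ((digs s.toList).count d) d) := by
  unfold solution_alt
  rw [show (fun (cs : List Int) (c : Char) =>
      if PySem.Chars.isdigit c then
        match PySem.Int.ofChars? [c] with
        | some v => cs.set v.toNat (PySem.List.pyGetD cs v 0 + 1)
        | none => cs
      else cs) = bstep from rfl]
  rw [PySem.List.foldl_append_eq_flatMap]
  rw [List.nil_append]
  apply List.flatMap_congr
  intro d hdmem
  obtain ⟨hd0, hd10⟩ := PySem.List.mem_pyRange_one.1 hdmem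
  obtain ⟨_, hv⟩ := counts_inv s.toList (List.replicate 10 0) (by simp)
  rw [hv d hd0 hd10]
  have hz : PySem.List.pyGetD (List.replicate 10 (0:Int)) d 0 = 0 := by
    rw [PySem.List.pyGetD_of_nonneg _ _ hd0, List.getD_eq_getElem?_getD,
        List.getElem?_replicate]
    split <;> rfl
  rw [hz, zero_add, Int.toNat_natCast]

theorem count_flat (M ds : List Int) (hnd : ds.Nodup) (a : Int) :
    (ds.flatMap fun d => List.replicate (M.count d) d).count a
      = if a ∈ ds then M.count a else 0 := by
  induction ds with
  | nil => simp
  | cons d ds ih =>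
    rw [List.nodup_cons] at hnd
    rw [List.flatMap_cons, List.count_append, List.count_replicate, ih hnd.2]
    by_cases he : a = d
    · subst he
      simp [hnd.1]
    · simp [he, Ne.symm he, List.mem_cons]
theorem flat_perm (M ds : List Int) (hnd : ds.Nodup) (hm : ∀ x ∈ M, x ∈ ds) :
    (ds.flatMap fun d => List.replicate (M.count d) d).Perm M := by
  rw [List.perm_iff_count]
  intro a
  rw [count_flat M ds hnd a]
  by_cases ha : a ∈ ds
  · simp [ha]
  · have : a ∉ M := fun hM => ha (hm a hM)
    simp [ha, List.count_eq_zero.2 this]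

theorem flat_pairwise (n : Int → Nat) (ds : List Int) (h : ds.Pairwise (· < ·)) :
    (ds.flatMap fun d => List.replicate (n d) d).Pairwise (· ≤ ·) := by
  induction ds with
  | nil => simp
  | cons d ds ih =>
    rw [List.pairwise_cons] at h
    rw [List.flatMap_cons, List.pairwise_append]
    refine ⟨List.pairwise_replicate.2 (Or.inr le_rfl), ih h.2, ?_⟩
    intro a ha b hb
    rw [List.eq_of_mem_replicate ha]
    obtain ⟨d', hd', hbd⟩ := List.mem_flatMap.1 hb
    rw [List.eq_of_mem_replicate hbd]
    exact le_of_lt (h.1 d' hd')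

theorem digs_mem_range (s : String) : ∀ x ∈ digs s.toList, x ∈ PySem.List.pyRange 0 10 1 := by
  intro x hx
  obtain ⟨c, hc, hcx⟩ := List.mem_map.1 hx
  obtain ⟨_, hdig⟩ := List.mem_filter.1 hc
  obtain ⟨h0, h10⟩ := dval_bounds c hdig
  exact PySem.List.mem_pyRange_one.2 (by omega)

-- ===== VERDICT (by name: the statement is the Claim_ definition above) =====
theorem solution_spec : Claim_equal_solution := by
  intro s _
  show solution s = solution_alt s
  rw [a_eq, b_eq]
  exact PySem.List.sorted_id_eq_of_perm_of_pairwise _ _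
    (flat_perm _ _ (PySem.List.nodup_pyRange_one 0 10) (digs_mem_range s))
    (flat_pairwise _ _ (PySem.List.pairwise_lt_pyRange_one 0 10))
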